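-- pv_equiv track=rewrite | github.com/aridawoodi/Restaurant-Daily-Operation-Sales-Automation | copy_dashboard_to_sheets.py | parse_selection_numbers
-- ===== SOURCE A (Python) =====
-- def parse_selection_numbers(raw_value: str, max_value: int) -> list:
--     if not raw_value.strip():
--         return []
--     tokens = raw_value.replace(",", " ").split()
--     selections = []
--     for token in tokens:
--         if not token.isdigit():
--             continue
--         value = int(token)
--         if 1 <= value <= max_value:
--             selections.append(value)
--     seen = set()
--     unique = []
--     for value in selections:
--         if value not in seen:
--             seen.add(value)
--             unique.append(value)
--     return unique
-- ===== SOURCE B (Python) =====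
-- def parse_selection_numbers(raw_value: str, max_value: int) -> list:
--     # single character-level scan: no replace/split/strip, no intermediate
--     # selections list, no seen-set -- dedupe by membership in the result itself
--     unique = []
--     i, n = 0, len(raw_value)
--     while i < n:
--         if raw_value[i] == "," or raw_value[i].isspace():
--             i += 1
--             continue
--         j = i
--         while j < n and not (raw_value[j] == "," or raw_value[j].isspace()):
--             j += 1
--         token = raw_value[i:j]
--         i = j
--         if token.isdigit():
--             value = int(token)
--             if 1 <= value <= max_value and value not in unique:
--                 unique.append(value)
--     return unique
-- ===== Notes on version B (the rewrite author's own statement) =====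
-- stated objective: alternative
-- what changed: Replaced A's staged pipeline (strip guard, replace+split into a token list, a validation loop building a selections list, then a seen-set dedup loop) by a direct character-level scanner that walks the string once with an index, cuts out each maximal non-separator run itself, and dedupes by membership in the growing result list; no replace/split/strip, no intermediate list, no set.
import Mathlib
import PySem

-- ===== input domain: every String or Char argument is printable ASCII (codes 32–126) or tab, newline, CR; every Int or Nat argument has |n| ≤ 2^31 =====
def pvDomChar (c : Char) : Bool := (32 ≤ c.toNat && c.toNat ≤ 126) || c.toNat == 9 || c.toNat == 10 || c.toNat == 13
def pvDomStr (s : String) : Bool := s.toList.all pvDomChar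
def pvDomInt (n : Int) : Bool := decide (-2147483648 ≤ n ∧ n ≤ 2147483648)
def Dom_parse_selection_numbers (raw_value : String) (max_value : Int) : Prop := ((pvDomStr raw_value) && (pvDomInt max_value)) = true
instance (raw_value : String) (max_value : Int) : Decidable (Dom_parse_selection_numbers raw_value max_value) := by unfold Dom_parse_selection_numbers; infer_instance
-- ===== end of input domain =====

-- B replaces A's staged pipeline (strip guard, replace+split, validation loop, seen-set dedup loop)
-- by one character-level scan that cuts out tokens itself and dedupes by membership in the result
-- list; objective: alternative (same result, genuinely different traversal, no speed claim).

-- ===== PORT A =====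
-- first loop body: skip non-digit tokens, keep int(token) when 1 <= value <= max_value
-- (int(token) cannot raise here since token.isdigit() holds, so the .getD 0 default is unreachable)
def pvAStep (max_value : Int) (acc : List Int) (token : String) : List Int :=
  if PySem.Str.strIsdigit token = true then
    let value := (PySem.Int.ofStr? token).getD 0
    if 1 ≤ value ∧ value ≤ max_value then acc ++ [value] else acc
  else acc

-- second loop body: if value not in seen: seen.add(value); unique.append(value)
def pvADedupStep (st : PySem.Set Int × List Int) (value : Int) : PySem.Set Int × List Int :=
  if PySem.Set.contains st.1 value = true then st
  else (PySem.Set.add st.1 value, st.2 ++ [value])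

def parse_selection_numbers (raw_value : String) (max_value : Int) : List Int :=
  if PySem.Str.strip raw_value = "" then []
  else
    let tokens := PySem.Str.split₀ (PySem.Str.replace raw_value "," " ")
    let selections := tokens.foldl (pvAStep max_value) []
    (selections.foldl pvADedupStep (PySem.Set.empty, [])).2

-- ===== PORT B =====
-- separator test of Source B: raw_value[i] == "," or raw_value[i].isspace()
def pvSep (c : Char) : Bool := c == ',' || PySem.Chars.isspace c

-- the while loop of Source B: skip a separator, or cut out the maximal non-separator run
-- (the inner index-advancing while loop = takeWhile/dropWhile over the remaining characters),
-- validate the token and append its value unless already present in `unique`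
def pvScan (max_value : Int) (cs : List Char) (unique : List Int) : List Int :=
  match cs with
  | [] => unique
  | c :: rest =>
    if pvSep c then pvScan max_value rest unique
    else
      let token := c :: rest.takeWhile (fun d => !pvSep d)
      let unique' :=
        if PySem.Chars.strIsdigit token = true then
          let value := (PySem.Int.ofChars? token).getD 0
          if (1 ≤ value ∧ value ≤ max_value) ∧ unique.contains value = false then
            unique ++ [value]
          else unique
        else unique
      pvScan max_value (rest.dropWhile (fun d => !pvSep d)) unique'
termination_by cs.length
decreasing_by
  · simp
  · simpa using Nat.lt_succ_of_le (List.length_dropWhile_le _ rest)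

def parse_selection_numbers_alt (raw_value : String) (max_value : Int) : List Int :=
  pvScan max_value raw_value.toList []

-- ===== PRECONDITION & SPEC =====
def Spec_parse_selection_numbers (raw_value : String) (max_value : Int) (out : List Int) : Prop := out = parse_selection_numbers_alt raw_value max_value
instance (raw_value : String) (max_value : Int) (out : List Int) : Decidable (Spec_parse_selection_numbers raw_value max_value out) := by unfold Spec_parse_selection_numbers; infer_instance

-- ===== CLAIM (what is proved, stated in full; the proofs are below) =====
def Claim_equal_parse_selection_numbers : Prop := ∀ (raw_value : String) (max_value : Int), Dom_parse_selection_numbers raw_value max_value → Spec_parse_selection_numbers raw_value max_value (parse_selection_numbers raw_value max_value)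

-- ===== LEMMAS AND PROOFS =====

-- the character substitution performed by raw_value.replace(",", " ")
def pvF (c : Char) : Char := if c = ',' then ' ' else c

theorem pvIsspace_pvF (c : Char) : PySem.Chars.isspace (pvF c) = pvSep c := by
  by_cases h : c = ','
  · subst h; decide
  · simp [pvF, pvSep, h]

theorem pvReplace_go_map (cs : List Char) :
    ∀ (fuel : Nat) (acc : List Char), cs.length ≤ fuel →
      PySem.Chars.replace.go [','] [' '] fuel cs acc = acc.reverse ++ cs.map pvF := by
  induction cs with
  | nil => intro fuel acc _; cases fuel <;> simp [PySem.Chars.replace.go]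
  | cons c t ih =>
    intro fuel acc hle
    cases fuel with
    | zero => simp at hle
    | succ n =>
      by_cases h : c = ','
      · subst h
        simp only [PySem.Chars.replace.go, List.isPrefixOf]
        simp [ih n (' ' :: acc) (by simpa using hle), pvF]
      · have hpre : List.isPrefixOf [','] (c :: t) = false := by
          simp [List.isPrefixOf]
          exact fun hh => h hh.symm
        simp only [PySem.Chars.replace.go]
        rw [if_neg (by simp [hpre])]
        simp [ih n (c :: acc) (by simpa using hle), pvF, h]

theorem pvReplace_map (cs : List Char) :
    PySem.Chars.replace cs [','] [' '] = cs.map pvF := by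
  simpa [PySem.Chars.replace] using pvReplace_go_map cs cs.length [] le_rfl

-- the token stream that Source B's scanner cuts out of the raw characters
def pvToks (cs : List Char) : List (List Char) :=
  match cs with
  | [] => []
  | c :: rest =>
    if pvSep c then pvToks rest
    else (c :: rest.takeWhile (fun d => !pvSep d)) :: pvToks (rest.dropWhile (fun d => !pvSep d))
termination_by cs.length
decreasing_by
  · simp
  · simpa using Nat.lt_succ_of_le (List.length_dropWhile_le _ rest)

-- str.split() of the substituted characters produces exactly that token stream
theorem pvSplit_go_spec (cs : List Char) :
    (∀ acc, PySem.Chars.split₀.go (cs.map pvF) [] acc = acc.reverse ++ pvToks cs) ∧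
    (∀ (cur : List Char) (acc : List (List Char)), cur ≠ [] →
      PySem.Chars.split₀.go (cs.map pvF) cur acc =
        acc.reverse ++ (cur.reverse ++ cs.takeWhile (fun d => !pvSep d)) ::
          pvToks (cs.dropWhile (fun d => !pvSep d))) := by
  induction cs with
  | nil =>
    refine ⟨fun acc => ?_, fun cur acc hcur => ?_⟩
    · simp [PySem.Chars.split₀.go, pvToks]
    · simp [PySem.Chars.split₀.go, hcur]
      simp [pvToks]
  | cons c rest ih =>
    obtain ⟨ihA, ihB⟩ := ih
    have hfc : ¬ pvSep c = true → pvF c = c := by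
      intro h; simp [pvSep] at h; simp [pvF, h.1]
    refine ⟨fun acc => ?_, fun cur acc hcur => ?_⟩
    · by_cases hs : pvSep c = true
      · simp only [List.map_cons, PySem.Chars.split₀.go, pvIsspace_pvF, hs]
        rw [if_pos trivial]
        simp only [List.isEmpty_nil]
        rw [if_pos trivial, ihA acc, pvToks, if_pos hs]
      · simp only [List.map_cons, PySem.Chars.split₀.go, pvIsspace_pvF, hs]
        rw [if_neg (by simp), hfc hs, ihB [c] acc (by simp)]
        rw [pvToks, if_neg hs]
        simp
    · by_cases hs : pvSep c = true
      · simp only [List.map_cons, PySem.Chars.split₀.go, pvIsspace_pvF, hs]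
        rw [if_pos trivial, if_neg (by simpa using hcur), ihA (cur.reverse :: acc)]
        have h1 : (c :: rest).takeWhile (fun d => !pvSep d) = [] := by
          simp [hs]
        have h2 : (c :: rest).dropWhile (fun d => !pvSep d) = c :: rest := by
          simp [hs]
        rw [h1, h2, pvToks, if_pos hs]
        simp
      · simp only [List.map_cons, PySem.Chars.split₀.go, pvIsspace_pvF, hs]
        rw [if_neg (by simp), hfc hs, ihB (c :: cur) acc (by simp)]
        have h1 : (c :: rest).takeWhile (fun d => !pvSep d) =
            c :: rest.takeWhile (fun d => !pvSep d) := by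
          simp [hs]
        have h2 : (c :: rest).dropWhile (fun d => !pvSep d) =
            rest.dropWhile (fun d => !pvSep d) := by
          simp [hs]
        rw [h1, h2]
        simp

theorem pvSplit_map (cs : List Char) :
    PySem.Chars.split₀ (cs.map pvF) = pvToks cs := by
  simpa [PySem.Chars.split₀] using (pvSplit_go_spec cs).1 []

-- the selections list A's first loop builds, over char-level tokens
def pvSelC (max_value : Int) : List (List Char) → List Int
  | [] => []
  | t :: ts =>
    if PySem.Chars.strIsdigit t = true then
      let v := (PySem.Int.ofChars? t).getD 0
      if 1 ≤ v ∧ v ≤ max_value then v :: pvSelC max_value ts else pvSelC max_value ts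
    else pvSelC max_value ts

theorem pvAStep_foldl_eq (max_value : Int) (ts : List String) :
    ∀ acc, ts.foldl (pvAStep max_value) acc = acc ++ pvSelC max_value (ts.map String.toList) := by
  induction ts with
  | nil => intro acc; simp [pvSelC]
  | cons t ts ih =>
    intro acc
    simp only [List.foldl_cons, pvAStep, List.map_cons, pvSelC,
      PySem.Str.strIsdigit_eq, PySem.Int.ofStr?]
    split_ifs <;> simp [ih]

-- B's per-token step over the token stream
def pvProcTok (max_value : Int) : List (List Char) → List Int → List Int
  | [], u => u
  | t :: ts, u =>
    pvProcTok max_value ts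
      (if PySem.Chars.strIsdigit t = true then
        let v := (PySem.Int.ofChars? t).getD 0
        if (1 ≤ v ∧ v ≤ max_value) ∧ u.contains v = false then u ++ [v] else u
      else u)

-- fusing A's dedup loop into the validation loop: seen-set membership = result-list membership
theorem pvFuse (max_value : Int) :
    ∀ (ts : List (List Char)) (s : PySem.Set Int) (u : List Int),
      (∀ v : Int, PySem.Set.contains s v = u.contains v) →
      ((pvSelC max_value ts).foldl pvADedupStep (s, u)).2 = pvProcTok max_value ts u := by
  intro ts
  induction ts with
  | nil => intro s u _; simp [pvSelC, pvProcTok]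
  | cons t ts ih =>
    intro s u hinv
    simp only [pvSelC, pvProcTok]
    by_cases hd : PySem.Chars.strIsdigit t = true
    · rw [if_pos hd, if_pos hd]
      set v := (PySem.Int.ofChars? t).getD 0 with hv
      by_cases hr : 1 ≤ v ∧ v ≤ max_value
      · rw [if_pos hr, List.foldl_cons]
        by_cases hc : u.contains v = true
        · have hme : v ∈ u := by simpa using hc
          rw [if_neg (by simp [hme])]
          have hsv : PySem.Set.contains s v = true := by rw [hinv v]; exact hc
          have hms : v ∈ s := by simpa using hsv
          have hstep : pvADedupStep (s, u) v = (s, u) := by simp [pvADedupStep, hms]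
          rw [hstep, ih s u hinv]
        · have hc' : u.contains v = false := by simpa using hc
          rw [if_pos ⟨hr, hc'⟩]
          have hsv : PySem.Set.contains s v = false := by rw [hinv v]; exact hc'
          have hns : v ∉ s := by simpa using hsv
          have hadd : PySem.Set.add s v = s ++ [v] := by
            simp [PySem.Set.add]; intro hm; exact absurd hm hns
          have hstep : pvADedupStep (s, u) v = (s ++ [v], u ++ [v]) := by
            simp [pvADedupStep, hns]
          rw [hstep, ih]
          intro w
          have hw := hinv w
          simp [PySem.Set.contains] at *
          simp [hw]
      · rw [if_neg hr, if_neg (fun h => hr h.1), ih s u hinv]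
    · rw [if_neg hd, if_neg hd]
      exact ih s u hinv

-- the scanner processes exactly the token stream
theorem pvScan_eq_procTok (max_value : Int) :
    ∀ (n : Nat) (cs : List Char) (u : List Int), cs.length ≤ n →
      pvScan max_value cs u = pvProcTok max_value (pvToks cs) u := by
  intro n
  induction n with
  | zero =>
    intro cs u h
    have : cs = [] := by simpa using List.length_eq_zero_iff.mp (Nat.le_zero.mp h)
    subst this; simp [pvScan, pvToks, pvProcTok]
  | succ n ih =>
    intro cs u h
    match cs with
    | [] => simp [pvScan, pvToks, pvProcTok]
    | c :: rest =>
      rw [pvScan, pvToks]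
      by_cases hs : pvSep c = true
      · rw [if_pos hs, if_pos hs]
        exact ih rest u (by simpa using h)
      · rw [if_neg hs, if_neg hs]
        simp only [pvProcTok]
        exact ih _ _ (le_trans (List.length_dropWhile_le _ rest) (by simpa using h))

-- an empty strip() means every character is whitespace, hence a separator
theorem pvStrip_nil_all (cs : List Char) (h : PySem.Chars.strip cs = []) :
    ∀ c ∈ cs, PySem.Chars.isspace c = true := by
  simp only [PySem.Chars.strip, PySem.Chars.rstrip, PySem.Chars.lstrip] at h
  have h1 : List.dropWhile PySem.Chars.isspace
      (List.dropWhile PySem.Chars.isspace cs).reverse = [] := by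
    simpa using congrArg List.reverse h
  have h2 : ∀ c ∈ (List.dropWhile PySem.Chars.isspace cs), PySem.Chars.isspace c = true := by
    intro c hc
    exact (List.dropWhile_eq_nil_iff.mp h1) c (by simpa using hc)
  have h3 : List.dropWhile PySem.Chars.isspace cs = [] := by
    by_contra hne
    have hd := List.head_dropWhile_not PySem.Chars.isspace hne
    rw [h2 _ (List.head_mem hne)] at hd
    simp at hd
  exact List.dropWhile_eq_nil_iff.mp h3

theorem pvToks_nil_of_all_sep (cs : List Char) (h : ∀ c ∈ cs, pvSep c = true) :
    pvToks cs = [] := by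
  induction cs with
  | nil => simp [pvToks]
  | cons c rest ih =>
    rw [pvToks, if_pos (h c (by simp))]
    exact ih (fun d hd => h d (by simp [hd]))

-- ===== VERDICT (by name: the statement is the Claim_ definition above) =====
theorem parse_selection_numbers_spec : Claim_equal_parse_selection_numbers := by
  intro raw_value max_value _hdom
  unfold Spec_parse_selection_numbers parse_selection_numbers parse_selection_numbers_alt
  have htoks : (PySem.Str.split₀ (PySem.Str.replace raw_value "," " ")).map String.toList
      = pvToks raw_value.toList := by
    rw [PySem.Str.split₀_map_toList, PySem.Str.toList_replace]
    have : (",".toList, " ".toList) = ([','], [' ']) := by decide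
    rw [show (",".toList) = [','] from by decide, show (" ".toList) = [' '] from by decide,
      pvReplace_map, pvSplit_map]
  split_ifs with hg
  · have hnil : PySem.Chars.strip raw_value.toList = [] := by
      have := congrArg String.toList hg
      rwa [PySem.Str.toList_strip] at this
    have hall := pvStrip_nil_all _ hnil
    rw [pvScan_eq_procTok max_value raw_value.toList.length _ [] le_rfl,
      pvToks_nil_of_all_sep _ (fun c hc => by simp [pvSep, hall c hc])]
    simp [pvProcTok]
  · show (List.foldl pvADedupStep (PySem.Set.empty, [])
        ((PySem.Str.split₀ (PySem.Str.replace raw_value "," " ")).foldl (pvAStep max_value) [])).2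
      = pvScan max_value raw_value.toList []
    rw [pvAStep_foldl_eq, htoks, List.nil_append,
      pvFuse max_value _ PySem.Set.empty [] (fun v => by simp [PySem.Set.empty, PySem.Set.contains]),
      pvScan_eq_procTok max_value raw_value.toList.length _ [] le_rfl]
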